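-- pv_equiv track=rewrite | github.com/saschatrebbin/ssl-check-webapp | ssl_checker.py | is_hostname_valid
-- ===== SOURCE A (Python) =====
-- def is_hostname_valid(hostname, common_name, sans):
--     """
--     Überprüft, ob der Hostname im CN oder in den SANs enthalten ist,
--     inklusive Wildcard-Unterstützung.
--     """
--     # Direkter Treffer?
--     if hostname == common_name or hostname in sans:
--         return True
--
--     # Wildcard-Prüfung
--     hostname_parts = hostname.split('.')
--
--     # Prüfe alle Wildcard-Einträge
--     wildcard_patterns = [s for s in sans if s.startswith('*.')]
--     if common_name and common_name.startswith('*.'):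
--         wildcard_patterns.append(common_name)
--
--     for pattern in wildcard_patterns:
--         if not pattern:
--             continue
--
--         # Entferne * und prüfe, ob die Domain übereinstimmt
--         pattern_parts = pattern.split('.')
--
--         # Wildcard gilt nur für eine Ebene, daher müssen beide gleich viele Teile haben
--         if len(hostname_parts) != len(pattern_parts):
--             continue
--
--         # Ersetze den Stern durch den ersten Teil des Hostnamens
--         pattern_parts[0] = pattern_parts[0].replace('*', hostname_parts[0])
--
--         # Vergleiche alle Teile
--         if '.'.join(pattern_parts) == hostname:
--             return True
--
--     return False
-- ===== SOURCE B (Python) =====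
-- def is_hostname_valid(hostname, common_name, sans):
--     # Direct hit?
--     if hostname == common_name or hostname in sans:
--         return True
--     # A single-label hostname can never match a '*.'-wildcard.
--     if '.' not in hostname:
--         return False
--     # Collect all wildcard patterns into a set, then do ONE lookup of the
--     # canonical wildcard key for this hostname.
--     wildcards = {s for s in sans if s.startswith('*.')}
--     if common_name.startswith('*.'):
--         wildcards.add(common_name)
--     return '*.' + hostname.split('.', 1)[1] in wildcards
-- ===== Notes on version B (the rewrite author's own statement) =====
-- stated objective: simpler
-- what changed: Replaces the per-pattern split/length-check/replace/join loop by computing the hostname's canonical wildcard key ('*.' + everything after the first label) once and doing a single set-membership test against the collected wildcard patterns.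
import Mathlib
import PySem

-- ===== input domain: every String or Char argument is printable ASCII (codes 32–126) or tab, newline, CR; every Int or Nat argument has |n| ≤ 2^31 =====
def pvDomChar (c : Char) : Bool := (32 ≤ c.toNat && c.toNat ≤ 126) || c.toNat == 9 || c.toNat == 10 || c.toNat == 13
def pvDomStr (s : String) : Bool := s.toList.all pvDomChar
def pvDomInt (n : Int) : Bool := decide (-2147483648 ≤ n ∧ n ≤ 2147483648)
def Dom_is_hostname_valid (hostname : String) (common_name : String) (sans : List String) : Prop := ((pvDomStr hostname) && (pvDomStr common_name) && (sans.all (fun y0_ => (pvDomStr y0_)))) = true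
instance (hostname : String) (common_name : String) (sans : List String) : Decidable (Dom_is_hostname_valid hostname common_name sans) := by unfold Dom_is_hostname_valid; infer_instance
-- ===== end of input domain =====

-- ===== PORT A =====
-- B replaces A's per-pattern split/replace/join loop by one computed wildcard key and a single set lookup (objective: simpler).

-- the 'for pattern in wildcard_patterns' loop with its early 'return True'
def is_hostname_valid_loop (hostname : String) (hostname_parts : List String) : List String → Bool
  | [] => false
  | pattern :: rest =>
    if pattern == "" then is_hostname_valid_loop hostname hostname_parts rest
    else
      -- pattern.split('.'): sep "." is nonempty so split? never raises
      let pattern_parts := (PySem.Str.split? pattern ".").getD []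
      if hostname_parts.length != pattern_parts.length then
        is_hostname_valid_loop hostname hostname_parts rest
      else
        -- pattern_parts[0] / hostname_parts[0]: str.split never returns [], so index 0 never raises
        let pattern_parts := pattern_parts.set 0
          (PySem.Str.replace (pattern_parts.headD "") "*" (hostname_parts.headD ""))
        if PySem.Str.join "." pattern_parts == hostname then true
        else is_hostname_valid_loop hostname hostname_parts rest

def is_hostname_valid (hostname : String) (common_name : String) (sans : List String) : Bool :=
  if hostname == common_name || sans.contains hostname then true
  else
    let hostname_parts := (PySem.Str.split? hostname ".").getD []  -- sep "." nonempty, never raises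
    let wildcard_patterns := sans.filter (fun s => PySem.Str.startswith s "*.")
    let wildcard_patterns :=
      if common_name != "" && PySem.Str.startswith common_name "*." then
        wildcard_patterns ++ [common_name]
      else wildcard_patterns
    is_hostname_valid_loop hostname hostname_parts wildcard_patterns

-- ===== PORT B =====
def is_hostname_valid_alt (hostname : String) (common_name : String) (sans : List String) : Bool :=
  if hostname == common_name || sans.contains hostname then true
  else if !(PySem.Str.isIn "." hostname) then false
  else
    let wildcards : PySem.Set String :=
      PySem.Set.ofList (sans.filter (fun s => PySem.Str.startswith s "*."))
    let wildcards :=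
      if PySem.Str.startswith common_name "*." then wildcards.add common_name else wildcards
    -- hostname.split('.', 1)[1]: '.' in hostname guarantees the split has a second piece
    PySem.Set.contains wildcards
      ("*." ++ (((PySem.Str.splitMax? hostname "." 1).getD []).getD 1 ""))

-- ===== PRECONDITION & SPEC =====
def Spec_is_hostname_valid (hostname : String) (common_name : String) (sans : List String) (out : Bool) : Prop := out = is_hostname_valid_alt hostname common_name sans
instance (hostname : String) (common_name : String) (sans : List String) (out : Bool) : Decidable (Spec_is_hostname_valid hostname common_name sans out) := by unfold Spec_is_hostname_valid; infer_instance

-- ===== CLAIM (what is proved, stated in full; the proofs are below) =====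
def Claim_equal_is_hostname_valid : Prop := ∀ (hostname : String) (common_name : String) (sans : List String), Dom_is_hostname_valid hostname common_name sans → Spec_is_hostname_valid hostname common_name sans (is_hostname_valid hostname common_name sans)

-- ===== LEMMAS AND PROOFS =====

-- split at '.' as a plain structural recursion: (first piece, remaining pieces)
def sdp : List Char → List Char × List (List Char)
  | [] => ([], [])
  | c :: t =>
    let r := sdp t
    if c = '.' then ([], r.1 :: r.2) else (c :: r.1, r.2)

theorem isPrefixOf_dot_pos (t : List Char) : List.isPrefixOf ['.'] ('.' :: t) = true := by
  simp [List.isPrefixOf]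

theorem isPrefixOf_dot_neg (c : Char) (t : List Char) (hc : c ≠ '.') :
    List.isPrefixOf ['.'] (c :: t) = false := by
  simp [List.isPrefixOf]; exact fun h => hc h.symm

theorem splitOn_go_spec (fuel : Nat) (l cur : List Char) (acc : List (List Char))
    (h : l.length ≤ fuel) :
    PySem.Chars.splitOn.go ['.'] fuel l cur acc =
      acc.reverse ++ ((cur.reverse ++ (sdp l).1) :: (sdp l).2) := by
  induction fuel generalizing l cur acc with
  | zero =>
    have : l = [] := List.eq_nil_of_length_eq_zero (Nat.le_zero.mp h)
    subst this
    rw [PySem.Chars.splitOn.go]; simp [sdp]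
  | succ n ih =>
    match l with
    | [] => rw [PySem.Chars.splitOn.go] <;> try omega
            simp [sdp]
    | c :: t =>
      rw [PySem.Chars.splitOn.go]
      by_cases hc : c = '.'
      · subst hc
        simp only [isPrefixOf_dot_pos, if_pos]
        rw [ih _ _ _ (by simp only [List.length_drop, List.length_cons] at h ⊢; omega)]
        simp [sdp]
      · simp only [isPrefixOf_dot_neg c t hc, Bool.false_eq_true, if_false]
        rw [ih _ _ _ (by simp only [List.length_cons] at h; omega)]
        simp [sdp, hc]

theorem splitOn_dot (l : List Char) :
    PySem.Chars.splitOn l ['.'] = (sdp l).1 :: (sdp l).2 := by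
  unfold PySem.Chars.splitOn
  rw [splitOn_go_spec _ _ _ _ (by omega)]
  simp

theorem splitOnMax_go_zero (fuel : Nat) (l cur : List Char) (acc : List (List Char)) :
    PySem.Chars.splitOnMax.go ['.'] fuel 0 l cur acc = acc.reverse ++ [cur.reverse ++ l] := by
  match fuel, l with
  | 0, l =>
    rw [PySem.Chars.splitOnMax.go]
    simp
  | n+1, [] =>
    rw [PySem.Chars.splitOnMax.go]
    · simp
    · omega
  | n+1, c :: t =>
    rw [PySem.Chars.splitOnMax.go]
    simp

theorem splitOnMax_go_one (fuel : Nat) (l cur : List Char) (acc : List (List Char))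
    (h : l.length ≤ fuel) :
    PySem.Chars.splitOnMax.go ['.'] fuel 1 l cur acc =
      acc.reverse ++
        (if '.' ∈ l then
          [cur.reverse ++ l.takeWhile (· ≠ '.'), (l.dropWhile (· ≠ '.')).tail]
        else [cur.reverse ++ l]) := by
  induction fuel generalizing l cur acc with
  | zero =>
    have : l = [] := List.eq_nil_of_length_eq_zero (Nat.le_zero.mp h)
    subst this
    rw [PySem.Chars.splitOnMax.go]; simp
  | succ n ih =>
    match l with
    | [] => rw [PySem.Chars.splitOnMax.go] <;> try omega
            simp
    | c :: t =>
      rw [PySem.Chars.splitOnMax.go]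
      by_cases hc : c = '.'
      · subst hc
        simp only [isPrefixOf_dot_pos, if_pos, if_neg (by omega : ¬ (1:Nat) = 0)]
        rw [splitOnMax_go_zero]
        simp [List.dropWhile]
      · simp only [isPrefixOf_dot_neg c t hc, Bool.false_eq_true, if_false,
          if_neg (by omega : ¬ (1:Nat) = 0)]
        rw [ih _ _ _ (by simp only [List.length_cons] at h; omega)]
        by_cases hd : '.' ∈ t
        · simp [hd, hc, Ne.symm hc, List.takeWhile, List.dropWhile]
        · simp [hd, Ne.symm hc]

theorem splitOnMax_dot_one (l : List Char) :
    PySem.Chars.splitOnMax l ['.'] 1 =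
      if '.' ∈ l then [l.takeWhile (· ≠ '.'), (l.dropWhile (· ≠ '.')).tail] else [l] := by
  rw [PySem.Chars.splitOnMax.eq_1]
  rw [if_neg (by omega)]
  rw [show ((1:Int).toNat) = 1 from rfl]
  rw [splitOnMax_go_one _ _ _ _ (by omega)]
  split <;> simp

theorem sdp_no_dot (l : List Char) (h : '.' ∉ l) : sdp l = (l, []) := by
  induction l with
  | nil => simp [sdp]
  | cons c t ih =>
    simp only [List.mem_cons, not_or] at h
    simp [sdp, Ne.symm h.1, ih h.2]

theorem sdp_append_dot (a b : List Char) (h : '.' ∉ a) :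
    sdp (a ++ '.' :: b) = (a, (sdp b).1 :: (sdp b).2) := by
  induction a with
  | nil => simp [sdp]
  | cons c t ih =>
    simp only [List.mem_cons, not_or] at h
    simp [sdp, Ne.symm h.1, ih h.2]

theorem dot_decomp (l : List Char) (h : '.' ∈ l) :
    l = l.takeWhile (· ≠ '.') ++ '.' :: (l.dropWhile (· ≠ '.')).tail ∧
      '.' ∉ l.takeWhile (· ≠ '.') := by
  induction l with
  | nil => simp at h
  | cons c t ih =>
    by_cases hc : c = '.'
    · subst hc; simp [List.takeWhile, List.dropWhile]
    · have ht : '.' ∈ t := by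
        rcases List.mem_cons.mp h with h' | h'
        · exact absurd h'.symm hc
        · exact h'
      obtain ⟨h1, h2⟩ := ih ht
      have htw : (c :: t).takeWhile (fun x => decide (x ≠ '.')) =
          c :: t.takeWhile (fun x => decide (x ≠ '.')) := by
        simp [hc]
      have hdw : (c :: t).dropWhile (fun x => decide (x ≠ '.')) =
          t.dropWhile (fun x => decide (x ≠ '.')) := by
        simp [hc]
      refine ⟨?_, ?_⟩
      · show c :: t = ((c :: t).takeWhile (fun x => decide (x ≠ '.'))) ++ _
        rw [htw, hdw]
        exact congrArg (c :: ·) h1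
      · show '.' ∉ (c :: t).takeWhile (fun x => decide (x ≠ '.'))
        rw [htw]
        simp only [List.mem_cons, not_or]
        exact ⟨Ne.symm hc, h2⟩

theorem join_sdp (l : List Char) :
    PySem.Chars.join ['.'] ((sdp l).1 :: (sdp l).2) = l := by
  induction l with
  | nil => simp [sdp, PySem.Chars.join_singleton]
  | cons c t ih =>
    by_cases hc : c = '.'
    · subst hc
      have hs : sdp ('.' :: t) = ([], (sdp t).1 :: (sdp t).2) := by simp [sdp]
      rw [hs, PySem.Chars.join_cons_cons]
      simpa using ih
    · have hs : sdp (c :: t) = (c :: (sdp t).1, (sdp t).2) := by simp [sdp, hc]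
      rw [hs]
      cases hsd : (sdp t).2 with
      | nil =>
        rw [hsd] at ih
        simp only [PySem.Chars.join_singleton] at ih ⊢
        simp [ih]
      | cons q qs =>
        rw [hsd] at ih
        rw [PySem.Chars.join_cons_cons] at ih ⊢
        simpa using congrArg (c :: ·) ih

theorem replace_star (n : List Char) : PySem.Chars.replace ['*'] ['*'] n = n := by
  show (if List.isEmpty ['*'] then _ else PySem.Chars.replace.go ['*'] n 1 ['*'] []) = n
  rw [if_neg (by simp)]
  rw [PySem.Chars.replace.go]
  rw [if_pos (by simp [List.isPrefixOf])]
  rw [PySem.Chars.replace.go]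
  simp

theorem string_eq_iff_toList (s t : String) : s = t ↔ s.toList = t.toList :=
  ⟨fun h => h ▸ rfl, fun h => by have := congrArg String.ofList h; simpa using this⟩

theorem singleton_infix_iff (a : Char) (l : List Char) : [a] <:+: l ↔ a ∈ l := by
  constructor
  · intro h; exact h.mem (by simp)
  · intro h
    obtain ⟨p, q, rfl⟩ := List.mem_iff_append.mp h
    exact ⟨p, q, by simp⟩

theorem isIn_dot_eq (hostname : String) :
    PySem.Str.isIn "." hostname = decide ('.' ∈ hostname.toList) := by
  rcases Classical.em ('.' ∈ hostname.toList) with hd | hd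
  · rw [decide_eq_true hd]
    rw [PySem.Str.isIn_iff_infix]
    exact (singleton_infix_iff _ _).mpr hd
  · rw [decide_eq_false hd]
    have := PySem.Str.isIn_eq ("." : String) hostname
    rw [this, PySem.Chars.isIn_eq_false_iff]
    show ¬ ((".".toList) <:+: hostname.toList)
    rw [show ".".toList = ['.'] from rfl, singleton_infix_iff]
    exact hd

theorem checkA_iff (hostname pattern : String)
    (hp : PySem.Str.startswith pattern "*." = true) :
    (((PySem.Str.split? hostname ".").getD []).length = ((PySem.Str.split? pattern ".").getD []).length ∧
       PySem.Str.join "." (((PySem.Str.split? pattern ".").getD []).set 0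
         (PySem.Str.replace (((PySem.Str.split? pattern ".").getD []).headD "") "*"
           (((PySem.Str.split? hostname ".").getD []).headD ""))) = hostname) ↔
      ('.' ∈ hostname.toList ∧
        pattern.toList = '*' :: '.' :: (hostname.toList.dropWhile (· ≠ '.')).tail) := by
  obtain ⟨q, hq⟩ : ∃ q, pattern.toList = '*' :: '.' :: q := by
    have h1 : ("*.".toList) <+: pattern.toList := by
      have := PySem.Str.startswith_eq pattern "*."
      rw [hp] at this
      exact (PySem.Chars.startswith_iff _ _).mp this.symm
    obtain ⟨t, ht⟩ := h1
    exact ⟨t, by simpa using ht.symm⟩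
  have hsplitp : (PySem.Str.split? pattern ".").getD [] =
      "*" :: String.ofList (sdp q).1 :: List.map String.ofList (sdp q).2 := by
    have hsp : sdp pattern.toList = (['*'], (sdp q).1 :: (sdp q).2) := by
      rw [hq]; simp [sdp]
    simp [PySem.Str.split?, PySem.Chars.split?, splitOn_dot, hsp]
  have hsplith : (PySem.Str.split? hostname ".").getD [] =
      List.map String.ofList ((sdp hostname.toList).1 :: (sdp hostname.toList).2) := by
    simp [PySem.Str.split?, PySem.Chars.split?, splitOn_dot]
  rw [hsplitp, hsplith]
  -- the replaced head is the hostname's first label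
  have hrep : PySem.Str.replace
      (("*" :: String.ofList (sdp q).1 :: List.map String.ofList (sdp q).2).headD "") "*"
      ((List.map String.ofList ((sdp hostname.toList).1 :: (sdp hostname.toList).2)).headD "") =
      String.ofList (sdp hostname.toList).1 := by
    show PySem.Str.replace "*" "*" (String.ofList (sdp hostname.toList).1) = _
    rw [string_eq_iff_toList]
    simp [PySem.Str.replace]
    exact replace_star _
  rw [hrep]
  -- the joined candidate equals firstLabel ++ '.' :: q
  have hjoin : (PySem.Str.join "."
      (("*" :: String.ofList (sdp q).1 :: List.map String.ofList (sdp q).2).set 0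
        (String.ofList (sdp hostname.toList).1))).toList =
      (sdp hostname.toList).1 ++ '.' :: q := by
    rw [PySem.Str.toList_join]
    have hmm : List.map String.toList
        (("*" :: String.ofList (sdp q).1 :: List.map String.ofList (sdp q).2).set 0
          (String.ofList (sdp hostname.toList).1)) =
        (sdp hostname.toList).1 :: (sdp q).1 :: (sdp q).2 := by
      simp [Function.comp_def]
    rw [hmm, show ".".toList = ['.'] from rfl, PySem.Chars.join_cons_cons, join_sdp]
    simp
  by_cases hd : '.' ∈ hostname.toList
  · obtain ⟨hdec, hnd⟩ := dot_decomp hostname.toList hd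
    have hsdH : sdp hostname.toList =
        (hostname.toList.takeWhile (· ≠ '.'),
          (sdp ((hostname.toList.dropWhile (· ≠ '.')).tail)).1 ::
          (sdp ((hostname.toList.dropWhile (· ≠ '.')).tail)).2) := by
      conv_lhs => rw [hdec]
      exact sdp_append_dot _ _ hnd
    constructor
    · rintro ⟨-, c2⟩
      rw [string_eq_iff_toList, hjoin] at c2
      refine ⟨hd, ?_⟩
      rw [hq]
      have : (sdp hostname.toList).1 ++ '.' :: q =
          (sdp hostname.toList).1 ++ '.' :: (hostname.toList.dropWhile (· ≠ '.')).tail := by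
        rw [c2]
        conv_lhs => rw [hdec]
        rw [hsdH]
      simpa using this
    · rintro ⟨-, hP⟩
      have hqtl : q = (hostname.toList.dropWhile (· ≠ '.')).tail := by
        rw [hq] at hP; simpa using hP
      constructor
      · simp only [List.length_cons, List.length_map, hsdH, hqtl]
      · rw [string_eq_iff_toList, hjoin, hqtl, hsdH]
        conv_rhs => rw [hdec]
  · constructor
    · rintro ⟨c1, -⟩
      rw [sdp_no_dot hostname.toList hd] at c1
      simp at c1
    · rintro ⟨hd', -⟩
      exact absurd hd' hd

theorem loop_eq_any (hostname : String) (ps : List String)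
    (hps : ∀ p ∈ ps, PySem.Str.startswith p "*." = true) :
    is_hostname_valid_loop hostname ((PySem.Str.split? hostname ".").getD []) ps =
      ps.any (fun p =>
        decide ('.' ∈ hostname.toList) &&
        decide (p.toList = '*' :: '.' :: (hostname.toList.dropWhile (· ≠ '.')).tail)) := by
  induction ps with
  | nil => simp [is_hostname_valid_loop]
  | cons p rest ih =>
    have hp := hps p (by simp)
    have hrest : ∀ x ∈ rest, PySem.Str.startswith x "*." = true :=
      fun x hx => hps x (by simp [hx])
    have hpne : (p == "") = false := beq_eq_false_iff_ne.mpr (by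
      intro e; subst e
      simp [PySem.Str.startswith, PySem.Chars.startswith] at hp)
    rw [List.any_cons, ← ih hrest]
    show (if (p == "") = true then _ else _) = _
    rw [hpne]
    simp only [Bool.false_eq_true, if_false]
    by_cases hlen : ((PySem.Str.split? hostname ".").getD []).length =
        ((PySem.Str.split? p ".").getD []).length
    · rw [if_neg (by simp [hlen])]
      by_cases hj : PySem.Str.join "." (((PySem.Str.split? p ".").getD []).set 0
          (PySem.Str.replace (((PySem.Str.split? p ".").getD []).headD "") "*"
            (((PySem.Str.split? hostname ".").getD []).headD ""))) = hostname
      · rw [if_pos (by simpa using hj)]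
        have := (checkA_iff hostname p hp).mp ⟨hlen, hj⟩
        rw [decide_eq_true this.1, decide_eq_true this.2]
        simp
      · rw [if_neg (by simpa using hj)]
        have hfalse : ¬ ('.' ∈ hostname.toList ∧
            p.toList = '*' :: '.' :: (hostname.toList.dropWhile (· ≠ '.')).tail) :=
          fun hcl => hj ((checkA_iff hostname p hp).mpr hcl).2
        rcases Classical.em ('.' ∈ hostname.toList) with hd | hd
        · have hne : p.toList ≠ '*' :: '.' :: (hostname.toList.dropWhile (· ≠ '.')).tail :=
            fun he => hfalse ⟨hd, he⟩
          rw [decide_eq_false hne, Bool.and_false, Bool.false_or]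
        · rw [decide_eq_false hd, Bool.false_and, Bool.false_or]
    · rw [if_pos (by simp [hlen])]
      have hfalse : ¬ ('.' ∈ hostname.toList ∧
          p.toList = '*' :: '.' :: (hostname.toList.dropWhile (· ≠ '.')).tail) :=
        fun hcl => hlen ((checkA_iff hostname p hp).mpr hcl).1
      rcases Classical.em ('.' ∈ hostname.toList) with hd | hd
      · have hne : p.toList ≠ '*' :: '.' :: (hostname.toList.dropWhile (· ≠ '.')).tail :=
          fun he => hfalse ⟨hd, he⟩
        rw [decide_eq_false hne, Bool.and_false, Bool.false_or]
      · rw [decide_eq_false hd, Bool.false_and, Bool.false_or]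

-- ===== VERDICT (by name: the statement is the Claim_ definition above) =====
theorem is_hostname_valid_spec : Claim_equal_is_hostname_valid := by
  intro hostname common_name sans _
  unfold Spec_is_hostname_valid
  unfold is_hostname_valid is_hostname_valid_alt
  by_cases hdir : (hostname == common_name || sans.contains hostname) = true
  · rw [if_pos hdir, if_pos hdir]
  · rw [if_neg hdir, if_neg hdir]
    rcases Classical.em ('.' ∈ hostname.toList) with hd | hd
    case neg.inr =>
      -- no dot in the hostname: A's loop finds nothing, B bails out
      rw [isIn_dot_eq, decide_eq_false hd]
      simp only [Bool.not_false, if_pos]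
      by_cases hsw : (common_name != "" && PySem.Str.startswith common_name "*.") = true
      · rw [if_pos hsw]
        rw [loop_eq_any _ _ (by
          intro p hp
          rcases List.mem_append.mp hp with h | h
          · exact (List.mem_filter.mp h).2
          · simp only [List.mem_singleton] at h; subst h
            exact (Bool.and_elim_right hsw))]
        rw [decide_eq_false hd]
        simp
      · rw [if_neg hsw]
        rw [loop_eq_any _ _ (fun p hp => (List.mem_filter.mp hp).2)]
        rw [decide_eq_false hd]
        simp
    case neg.inl =>
      rw [isIn_dot_eq, decide_eq_true hd]
      simp only [Bool.not_true, Bool.false_eq_true, if_false]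
      -- B's key piece is the hostname's tail after the first dot
      have hsmax : ((PySem.Str.splitMax? hostname "." 1).getD []).getD 1 "" =
          String.ofList ((hostname.toList.dropWhile (· ≠ '.')).tail) := by
        simp [PySem.Str.splitMax?, PySem.Chars.splitMax?, splitOnMax_dot_one, hd]
      have hkey : ("*." ++ String.ofList ((hostname.toList.dropWhile (· ≠ '.')).tail)).toList =
          '*' :: '.' :: (hostname.toList.dropWhile (· ≠ '.')).tail := by
        rw [String.toList_append, show "*.".toList = ['*', '.'] from rfl]
        simp
      rw [hsmax]
      set key := "*." ++ String.ofList ((hostname.toList.dropWhile (· ≠ '.')).tail) with hkeydef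
      by_cases hsw : PySem.Str.startswith common_name "*." = true
      · have hcne : common_name ≠ "" := by
          intro e; subst e
          simp [PySem.Str.startswith, PySem.Chars.startswith] at hsw
        rw [if_pos (Bool.and_eq_true .. |>.mpr ⟨bne_iff_ne.mpr hcne, hsw⟩), if_pos hsw]
        rw [loop_eq_any _ _ (by
          intro p hp
          rcases List.mem_append.mp hp with h | h
          · exact (List.mem_filter.mp h).2
          · simp only [List.mem_singleton] at h; subst h; exact hsw)]
        rw [Bool.eq_iff_iff]
        rw [PySem.Set.contains_iff, PySem.Set.mem_add, PySem.Set.mem_ofList]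
        simp only [List.any_append, List.any_eq_true, List.mem_filter, Bool.or_eq_true,
          decide_eq_true hd, Bool.true_and, decide_eq_true_eq, List.any_cons, List.any_nil,
          Bool.or_false]
        constructor
        · rintro (⟨p, ⟨hps, hpw⟩, hpe⟩ | hce)
          · have hpk : p = key := by rw [string_eq_iff_toList, hkey]; exact hpe
            subst hpk
            exact Or.inl ⟨hps, hpw⟩
          · exact Or.inr (by rw [string_eq_iff_toList, hkey]; exact hce.symm)
        · rintro (⟨hks, hkw⟩ | hkc)
          · exact Or.inl ⟨key, ⟨hks, hkw⟩, hkey⟩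
          · exact Or.inr (by rw [← hkc]; exact hkey)
      · have hswf : PySem.Str.startswith common_name "*." = false := Bool.eq_false_iff.mpr hsw
        rw [if_neg (fun hco => hsw (Bool.and_elim_right hco)), if_neg hsw]
        rw [loop_eq_any _ _ (fun p hp => (List.mem_filter.mp hp).2)]
        rw [Bool.eq_iff_iff]
        rw [PySem.Set.contains_iff, PySem.Set.mem_ofList]
        simp only [List.any_eq_true, List.mem_filter, decide_eq_true hd, Bool.true_and,
          decide_eq_true_eq]
        constructor
        · rintro ⟨p, ⟨hps, hpw⟩, hpe⟩
          have hpk : p = key := by rw [string_eq_iff_toList, hkey]; exact hpe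
          subst hpk
          exact ⟨hps, hpw⟩
        · rintro ⟨hks, hkw⟩
          exact ⟨key, ⟨hks, hkw⟩, hkey⟩
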